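-- pv_equiv track=rewrite | github.com/adamwrightstuff/home-fit | data_sources/places_active_outdoors_client.py | _classify_local
-- ===== SOURCE A (Python) =====
-- from typing import Any, Dict, List, Optional, Set, Tuple
--
-- def _classify_local(types: List[str]) -> Optional[str]:
--     """Pick one AO-local category from Google types (order-independent)."""
--     if not isinstance(types, list):
--         return None
--     if "marina" in types:
--         return None
--     if "playground" in types:
--         return "playground"
--     for t in ("national_park", "botanical_garden", "dog_park", "golf_course", "park"):
--         if t in types:
--             return t
--     return None
-- ===== SOURCE B (Python) =====
-- from typing import Any, Dict, List, Optional, Set, Tuple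
--
-- _RANKS = {"playground": 0, "national_park": 1, "botanical_garden": 2,
--           "dog_park": 3, "golf_course": 4, "park": 5}
-- _NAMES = ["playground", "national_park", "botanical_garden",
--           "dog_park", "golf_course", "park"]
--
-- def _classify_local(types: List[str]) -> Optional[str]:
--     """Pick one AO-local category from Google types (order-independent)."""
--     if not isinstance(types, list):
--         return None
--     veto = False
--     best = None
--     for t in types:
--         if t == "marina":
--             veto = True
--         else:
--             r = _RANKS.get(t)
--             if r is not None and (best is None or r < best):
--                 best = r
--     if veto or best is None:
--         return None
--     return _NAMES[best]
-- ===== Notes on version B (the rewrite author's own statement) =====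
-- stated objective: alternative
-- what changed: Replaces A's seven separate membership scans over the input (one per category, in priority order) by a single pass over `types` maintaining a marina veto flag and the minimum priority rank seen, resolved to a name through a fixed rank table at the end.
import Mathlib
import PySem

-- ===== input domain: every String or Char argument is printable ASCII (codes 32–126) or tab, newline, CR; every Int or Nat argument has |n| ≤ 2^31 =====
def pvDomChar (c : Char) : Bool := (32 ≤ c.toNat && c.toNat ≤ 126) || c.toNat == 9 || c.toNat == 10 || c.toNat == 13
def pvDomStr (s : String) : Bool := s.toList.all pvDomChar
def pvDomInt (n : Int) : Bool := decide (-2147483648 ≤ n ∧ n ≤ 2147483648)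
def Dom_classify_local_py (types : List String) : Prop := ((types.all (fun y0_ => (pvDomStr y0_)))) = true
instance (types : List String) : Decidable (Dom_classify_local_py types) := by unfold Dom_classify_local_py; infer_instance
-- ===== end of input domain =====

-- B replaces A's per-category membership scans by a single pass keeping a marina flag and the minimum priority rank (alternative decomposition; equivalence proved on Dom).


-- ===== PORT A =====
-- the for-loop over the fixed tuple: return the first tuple element contained in `types`
def firstMemA (types : List String) : List String → Option String
  | [] => none
  | t :: ts => if types.contains t then some t else firstMemA types ts

def classify_local_py (types : List String) : Option String :=
  if types.contains "marina" then none
  else if types.contains "playground" then some "playground"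
  else firstMemA types ["national_park", "botanical_garden", "dog_park", "golf_course", "park"]

-- ===== PORT B =====
-- _RANKS.get(t)
def rankB (t : String) : Option Nat :=
  if t = "playground" then some 0
  else if t = "national_park" then some 1
  else if t = "botanical_garden" then some 2
  else if t = "dog_park" then some 3
  else if t = "golf_course" then some 4
  else if t = "park" then some 5
  else none

-- _NAMES
def namesB : List String :=
  ["playground", "national_park", "botanical_garden", "dog_park", "golf_course", "park"]

-- one iteration of Source B's loop over (veto, best)
def stepB (s : Bool × Option Nat) (t : String) : Bool × Option Nat :=
  if t = "marina" then (true, s.2)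
  else
    match rankB t with
    | none => s
    | some r =>
      match s.2 with
      | none => (s.1, some r)
      | some b => if r < b then (s.1, some r) else s

def classify_local_py_alt (types : List String) : Option String :=
  let s := types.foldl stepB (false, none)
  if s.1 then none
  else
    match s.2 with
    | none => none
    | some r => some (namesB.getD r "")   -- _NAMES[best]; best is always a valid rank 0..5

-- ===== PRECONDITION & SPEC =====
def Spec_classify_local_py (types : List String) (out : Option String) : Prop := out = classify_local_py_alt types
instance (types : List String) (out : Option String) : Decidable (Spec_classify_local_py types out) := by unfold Spec_classify_local_py; infer_instance

-- ===== CLAIM (what is proved, stated in full; the proofs are below) =====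
def Claim_equal_classify_local_py : Prop := ∀ (types : List String), Dom_classify_local_py types → Spec_classify_local_py types (classify_local_py types)

-- ===== LEMMAS AND PROOFS =====

-- optional-min combination used to characterise the best-rank accumulator
def omin (a b : Option Nat) : Option Nat :=
  match a, b with
  | none, y => y
  | some x, none => some x
  | some x, some y => some (min x y)

def updR (b : Option Nat) (t : String) : Option Nat := omin b (rankB t)

def minR (l : List String) : Option Nat := l.foldl updR none

theorem omin_none_right (a : Option Nat) : omin a none = a := by cases a <;> rfl

theorem omin_assoc (a b c : Option Nat) : omin (omin a b) c = omin a (omin b c) := by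
  cases a <;> cases b <;> cases c <;> simp [omin, Nat.min_assoc]

theorem stepB_eq (v : Bool) (b : Option Nat) (t : String) :
    stepB (v, b) t = (v || (t == "marina"), updR b t) := by
  by_cases h : t = "marina"
  · subst h; simp [stepB, updR, rankB, omin_none_right]
  · have hb : (t == "marina") = false := by simp [h]
    simp only [stepB, if_neg h, hb, Bool.or_false, updR]
    cases hr : rankB t with
    | none => cases b <;> rfl
    | some r =>
      cases b with
      | none => rfl
      | some bb =>
        by_cases hlt : r < bb
        · simp [hlt, omin, Nat.min_eq_right (Nat.le_of_lt hlt)]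
        · simp [hlt, omin, Nat.min_eq_left (Nat.le_of_not_lt hlt)]

theorem foldl_stepB (l : List String) (v : Bool) (b : Option Nat) :
    l.foldl stepB (v, b) = (v || l.contains "marina", l.foldl updR b) := by
  induction l generalizing v b with
  | nil => simp
  | cons t ts ih =>
    simp only [List.foldl, stepB_eq, ih, List.contains_cons, Bool.or_assoc]
    rw [show (t == "marina") = ("marina" == t) from by simp [eq_comm]]

theorem foldl_updR (l : List String) (b : Option Nat) :
    l.foldl updR b = omin b (minR l) := by
  induction l generalizing b with
  | nil => simp [minR, omin_none_right]
  | cons t ts ih =>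
    show ts.foldl updR (updR b t) = omin b (minR (t :: ts))
    have h2 : minR (t :: ts) = omin (updR none t) (minR ts) := by
      show ts.foldl updR (updR none t) = _
      rw [ih]
    rw [ih, h2]
    show omin (omin b (rankB t)) (minR ts) = omin b (omin (updR none t) (minR ts))
    have h3 : updR none t = rankB t := rfl
    rw [h3, omin_assoc]

theorem minR_cons (t : String) (ts : List String) :
    minR (t :: ts) = omin (rankB t) (minR ts) := by
  show ts.foldl updR (updR none t) = _
  rw [foldl_updR]; rfl

-- rankB's graph: which strings are ranked, and rank→name inversion
theorem rankB_some {x : String} {r : Nat} (h : rankB x = some r) :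
    r ≤ 5 ∧ x = namesB.getD r "" := by
  unfold rankB at h
  split_ifs at h <;> cases h <;> exact ⟨by omega, by subst_vars; rfl⟩

theorem rankB_name (k : Nat) (hk : k ≤ 5) : rankB (namesB.getD k "") = some k := by
  interval_cases k <;> rfl

theorem minR_le_of_mem {l : List String} {x : String} {r : Nat}
    (hx : x ∈ l) (hr : rankB x = some r) : ∃ r', minR l = some r' ∧ r' ≤ r := by
  induction l with
  | nil => cases hx
  | cons t ts ih =>
    rw [minR_cons]
    rcases List.mem_cons.mp hx with h | h
    · subst h; rw [hr]
      cases hms : minR ts with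
      | none => exact ⟨r, rfl, Nat.le_refl r⟩
      | some s => exact ⟨min r s, rfl, Nat.min_le_left r s⟩
    · obtain ⟨r', hr', hle⟩ := ih h
      rw [hr']
      cases hrt : rankB t with
      | none => exact ⟨r', rfl, hle⟩
      | some q => exact ⟨min q r', rfl, Nat.le_trans (Nat.min_le_right q r') hle⟩

theorem minR_mem {l : List String} {r : Nat} (h : minR l = some r) :
    ∃ x, x ∈ l ∧ rankB x = some r := by
  induction l with
  | nil => simp [minR] at h
  | cons t ts ih =>
    rw [minR_cons] at h
    cases hrt : rankB t with
    | none =>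
      rw [hrt] at h; simp [omin] at h
      cases hms : minR ts with
      | none => rw [hms] at h; cases h
      | some s =>
        rw [hms] at h; cases h
        obtain ⟨x, hx, hxr⟩ := ih hms
        exact ⟨x, List.mem_cons_of_mem _ hx, hxr⟩
    | some q =>
      rw [hrt] at h
      cases hms : minR ts with
      | none =>
        rw [hms] at h; simp [omin] at h; subst h
        exact ⟨t, List.mem_cons_self, hrt⟩
      | some s =>
        rw [hms] at h; simp [omin] at h
        rcases min_choice q s with hm | hm <;> rw [hm] at h
        · exact ⟨t, List.mem_cons_self, h ▸ hrt⟩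
        · obtain ⟨x, hx, hxr⟩ := ih (h ▸ hms)
          exact ⟨x, List.mem_cons_of_mem _ hx, hxr⟩

-- if rank k's name is present and no better-ranked name is, the minimum rank is k
theorem minR_eq_of (l : List String) (k : Nat) (hk : k ≤ 5)
    (hin : namesB.getD k "" ∈ l) (habs : ∀ j, j < k → namesB.getD j "" ∉ l) :
    minR l = some k := by
  obtain ⟨r', hr', hle⟩ := minR_le_of_mem hin (rankB_name k hk)
  obtain ⟨x, hx, hrx⟩ := minR_mem hr'
  obtain ⟨hr5, hxe⟩ := rankB_some hrx
  rcases Nat.lt_or_ge r' k with h | h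
  · exact absurd hx (hxe ▸ habs r' h)
  · rw [hr', Nat.le_antisymm hle h]

theorem minR_none (l : List String) (habs : ∀ j, j ≤ 5 → namesB.getD j "" ∉ l) :
    minR l = none := by
  cases h : minR l with
  | none => rfl
  | some r =>
    obtain ⟨x, hx, hrx⟩ := minR_mem h
    obtain ⟨hr5, hxe⟩ := rankB_some hrx
    exact absurd hx (hxe ▸ habs r hr5)

theorem alt_eq (types : List String) :
    classify_local_py_alt types =
      if types.contains "marina" then none
      else match minR types with
           | none => none
           | some r => some (namesB.getD r "") := by
  unfold classify_local_py_alt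
  rw [foldl_stepB]
  rfl

theorem contains_false_of_not_mem {l : List String} {x : String} (h : x ∉ l) :
    l.contains x = false := by
  simp [h]

-- ===== VERDICT (by name: the statement is the Claim_ definition above) =====
theorem classify_local_py_spec : Claim_equal_classify_local_py := by
  intro types _
  unfold Spec_classify_local_py
  rw [alt_eq]
  by_cases hm : "marina" ∈ types
  · simp [classify_local_py, hm]
  · rw [contains_false_of_not_mem hm]
    unfold classify_local_py
    rw [contains_false_of_not_mem hm]
    by_cases h0 : "playground" ∈ types
    · rw [minR_eq_of types 0 (by omega) h0 (by intro j hj; omega)]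
      simp [h0, namesB]
    · by_cases h1 : "national_park" ∈ types
      · rw [minR_eq_of types 1 (by omega) h1 (by
          intro j hj; interval_cases j; exact h0)]
        simp [h0, h1, firstMemA, namesB]
      · by_cases h2 : "botanical_garden" ∈ types
        · rw [minR_eq_of types 2 (by omega) h2 (by
            intro j hj; interval_cases j; exacts [h0, h1])]
          simp [h0, h1, h2, firstMemA, namesB]
        · by_cases h3 : "dog_park" ∈ types
          · rw [minR_eq_of types 3 (by omega) h3 (by
              intro j hj; interval_cases j; exacts [h0, h1, h2])]
            simp [h0, h1, h2, h3, firstMemA, namesB]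
          · by_cases h4 : "golf_course" ∈ types
            · rw [minR_eq_of types 4 (by omega) h4 (by
                intro j hj; interval_cases j; exacts [h0, h1, h2, h3])]
              simp [h0, h1, h2, h3, h4, firstMemA, namesB]
            · by_cases h5 : "park" ∈ types
              · rw [minR_eq_of types 5 (by omega) h5 (by
                  intro j hj; interval_cases j; exacts [h0, h1, h2, h3, h4])]
                simp [h0, h1, h2, h3, h4, h5, firstMemA, namesB]
              · rw [minR_none types (by
                  intro j hj; interval_cases j; exacts [h0, h1, h2, h3, h4, h5])]
                simp [h0, h1, h2, h3, h4, h5, firstMemA]
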